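-- pv_equiv track=rewrite | github.com/ameliahardy/124-pa7-transcripts | grading-for-167992874/chatbot.py | remove_quoted
-- ===== SOURCE A (Python) =====
-- def remove_quoted(string):
--     new_string = ""
--     in_quote = False
--
--     for char in string:
--         if char == '"':
--             in_quote = not in_quote
--         elif not in_quote:
--             new_string += char
--     return new_string
-- ===== SOURCE B (Python) =====
-- def remove_quoted(string):
--     # Segments between quote marks alternate outside/inside; keep the even ones.
--     return "".join(string.split('"')[::2])
-- ===== Notes on version B (the rewrite author's own statement) =====
-- stated objective: simpler
-- what changed: Replaced the char-by-char loop with an in_quote toggle flag by a one-liner: split the string at every quote mark and join every other segment (segments[::2]), which are exactly the outside-quote runs.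
import Mathlib
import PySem

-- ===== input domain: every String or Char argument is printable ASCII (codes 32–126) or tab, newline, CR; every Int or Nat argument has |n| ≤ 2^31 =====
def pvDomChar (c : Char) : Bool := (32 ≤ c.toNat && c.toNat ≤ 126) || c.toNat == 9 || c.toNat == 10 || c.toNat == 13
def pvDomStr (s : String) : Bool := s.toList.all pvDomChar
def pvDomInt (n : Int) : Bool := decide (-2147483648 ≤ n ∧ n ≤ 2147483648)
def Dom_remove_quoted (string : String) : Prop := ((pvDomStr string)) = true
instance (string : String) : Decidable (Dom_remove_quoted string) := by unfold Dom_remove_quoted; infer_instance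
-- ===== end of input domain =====

-- B replaces A's char-by-char in_quote state machine by split-at-quotes + keep every other segment + join (objective: simpler).

-- ===== PORT A =====
-- state machine: accumulate chars (new_string as a List Char) while the in_quote flag is off
def remove_quoted (string : String) : String :=
  let st := string.toList.foldl
    (fun (st : List Char × Bool) char =>
      if char = '"' then (st.1, !st.2)
      else if !st.2 then (st.1 ++ [char], st.2)
      else st)
    ([], false)
  String.ofList st.1

-- ===== PORT B =====
-- string.split('"')  →  [::2]  →  ''.join
def remove_quoted_alt (string : String) : String :=
  let segments := (PySem.Str.split? string "\"").getD []
  let kept := (PySem.List.slice? segments none none 2).getD []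
  PySem.Str.join "" kept

-- ===== PRECONDITION & SPEC =====
def Spec_remove_quoted (string : String) (out : String) : Prop := out = remove_quoted_alt string
instance (string : String) (out : String) : Decidable (Spec_remove_quoted string out) := by unfold Spec_remove_quoted; infer_instance

-- ===== CLAIM (what is proved, stated in full; the proofs are below) =====
def Claim_equal_remove_quoted : Prop := ∀ (string : String), Dom_remove_quoted string → Spec_remove_quoted string (remove_quoted string)

-- ===== LEMMAS AND PROOFS =====

-- functional characterisation of splitting on '"'
def splitQ : List Char → List (List Char)
  | [] => [[]]
  | c :: rest =>
    if c = '"' then [] :: splitQ rest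
    else
      match splitQ rest with
      | [] => [[c]]
      | p :: ps => (c :: p) :: ps

-- every other element, starting at index 0
def evens {α : Type} : List α → List α
  | [] => []
  | [x] => [x]
  | x :: _ :: rest => x :: evens rest

-- functional characterisation of A's loop
def fA : List Char → Bool → List Char
  | [], _ => []
  | c :: cs, q =>
    if c = '"' then fA cs (!q)
    else if q then fA cs q
    else c :: fA cs q

theorem splitQ_ne_nil (l : List Char) : splitQ l ≠ [] := by
  cases l with
  | nil => simp [splitQ]
  | cons c rest =>
    simp only [splitQ]
    split
    · simp
    · cases h : splitQ rest <;> simp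

theorem go_eq (l : List Char) : ∀ (fuel : Nat) (cur : List Char) (acc : List (List Char)),
    l.length ≤ fuel →
    PySem.Chars.splitOn.go ['"'] fuel l cur acc
      = acc.reverse ++ (splitQ l).modifyHead (cur.reverse ++ ·) := by
  induction l with
  | nil =>
    intro fuel cur acc _
    cases fuel <;> simp [PySem.Chars.splitOn.go, splitQ]
  | cons c rest ih =>
    intro fuel cur acc hle
    cases fuel with
    | zero => simp at hle
    | succ f =>
      have hf : rest.length ≤ f := by simpa using Nat.lt_succ_iff.mp (by simpa using hle)
      by_cases hc : c = '"'
      · subst hc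
        have hpre : List.isPrefixOf ['"'] ('"' :: rest) = true := by
          simp [List.isPrefixOf]
        simp only [PySem.Chars.splitOn.go, hpre, if_pos, List.length_singleton,
          List.drop_succ_cons, List.drop_zero]
        rw [ih f [] (cur.reverse :: acc) hf]
        simp only [splitQ, List.reverse_cons, List.reverse_nil, List.nil_append]
        cases h : splitQ rest with
        | nil => exact absurd h (splitQ_ne_nil rest)
        | cons p ps => simp
      · have hpre : List.isPrefixOf ['"'] (c :: rest) = false := by
          simp [List.isPrefixOf]; exact fun h => hc h.symm
        simp only [PySem.Chars.splitOn.go, hpre, Bool.false_eq_true, if_false]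
        rw [ih f (c :: cur) acc hf]
        simp only [splitQ, if_neg hc]
        cases h : splitQ rest with
        | nil => exact absurd h (splitQ_ne_nil rest)
        | cons p ps => simp

theorem splitOn_quote (l : List Char) : PySem.Chars.splitOn l ['"'] = splitQ l := by
  rw [PySem.Chars.splitOn, go_eq l (l.length + 1) [] [] (by omega)]
  cases h : splitQ l with
  | nil => exact absurd h (splitQ_ne_nil l)
  | cons p ps => simp

theorem evens_map {α β : Type} (f : α → β) (l : List α) :
    evens (l.map f) = (evens l).map f := by
  induction l using evens.induct <;> simp_all [evens]

theorem filterMap_range_evens {α : Type} (xs : List α) :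
    (List.range ((xs.length + 1) / 2)).filterMap (fun k => xs[2 * k]?) = evens xs := by
  induction xs using evens.induct with
  | case1 => simp [evens]
  | case2 x => simp [evens]
  | case3 x y rest ih =>
    have hc : (((x :: y :: rest).length + 1) / 2) = (rest.length + 1) / 2 + 1 := by
      simp only [List.length_cons]; omega
    rw [hc, List.range_succ_eq_map, List.filterMap_cons, List.filterMap_map]
    have hfun : ((fun k => (x :: y :: rest)[2 * k]?) ∘ Nat.succ)
        = fun k => rest[2 * k]? := by
      funext k
      simp [Nat.mul_succ]
    simp only [hfun, ih, Nat.mul_zero, List.getElem?_cons_zero, evens]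

theorem slice2 {α : Type} (xs : List α) :
    PySem.List.slice? xs none none 2 = some (evens xs) := by
  rw [PySem.List.slice?]
  simp only [PySem.List.sliceIndices]
  norm_num
  have hcnt : (if 0 < xs.length then (((xs.length : Int) + 2 - 1) / 2).toNat else 0)
      = (xs.length + 1) / 2 := by
    split <;> omega
  have harg : ∀ k : Nat, ((2 * (k : Int)).toNat) = 2 * k := by intro k; omega
  calc List.filterMap (fun k : Nat => xs[(2 * (k : Int)).toNat]?)
        (List.range (if 0 < xs.length then (((xs.length : Int) + 2 - 1) / 2).toNat else 0))
      = List.filterMap (fun k : Nat => xs[2 * k]?) (List.range ((xs.length + 1) / 2)) := by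
        rw [hcnt]; exact List.filterMap_congr (fun k _ => by rw [harg])
    _ = evens xs := filterMap_range_evens xs

theorem intersperse_nil_flatten {α : Type} (l : List (List α)) :
    (List.intersperse [] l).flatten = l.flatten := by
  induction l with
  | nil => rfl
  | cons a t ih =>
    cases t with
    | nil => rfl
    | cons b t' => simp_all [List.intersperse]

theorem fold_eq_fA (l : List Char) : ∀ (acc : List Char) (q : Bool),
    (l.foldl (fun (st : List Char × Bool) char =>
      if char = '"' then (st.1, !st.2)
      else if !st.2 then (st.1 ++ [char], st.2)
      else st) (acc, q)).1 = acc ++ fA l q := by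
  induction l with
  | nil => intro acc q; simp [fA]
  | cons c cs ih =>
    intro acc q
    rw [List.foldl_cons]
    by_cases hc : c = '"'
    · rw [if_pos hc, ih]
      simp [fA, hc]
    · cases q with
      | false =>
        rw [if_neg hc]
        rw [show (if (!(acc, false).2) = true then ((acc, false).1 ++ [c], (acc, false).2)
            else (acc, false)) = (acc ++ [c], false) from by simp, ih]
        simp [fA, hc]
      | true =>
        rw [if_neg hc]
        rw [show (if (!(acc, true).2) = true then ((acc, true).1 ++ [c], (acc, true).2)
            else (acc, true)) = (acc, true) from by simp, ih]
        simp [fA, hc]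

theorem fA_eq_evens (l : List Char) :
    fA l false = (evens (splitQ l)).flatten ∧
    fA l true = (evens ((splitQ l).tail)).flatten := by
  induction l with
  | nil => simp [fA, splitQ, evens]
  | cons c rest ih =>
    obtain ⟨ih1, ih2⟩ := ih
    by_cases hc : c = '"'
    · subst hc
      have hs : splitQ ('"' :: rest) = [] :: splitQ rest := by simp [splitQ]
      constructor
      · show fA rest (!false) = _
        rw [hs]
        cases h : splitQ rest with
        | nil => exact absurd h (splitQ_ne_nil rest)
        | cons p ps =>
          simp only [Bool.not_false, ih2, h, List.tail_cons, evens, List.flatten_cons,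
            List.nil_append]
      · show fA rest (!true) = _
        rw [hs]
        simpa using ih1
    · obtain ⟨p, ps, h⟩ : ∃ p ps, splitQ rest = p :: ps := by
        cases h : splitQ rest with
        | nil => exact absurd h (splitQ_ne_nil rest)
        | cons p ps => exact ⟨p, ps, rfl⟩
      have hs : splitQ (c :: rest) = (c :: p) :: ps := by
        simp only [splitQ, if_neg hc, h]
      constructor
      · show (if c = '"' then fA rest (!false) else if false then fA rest false
          else c :: fA rest false) = _
        rw [if_neg hc, if_neg (by simp), hs, ih1, h]
        cases ps with
        | nil => simp [evens]
        | cons q qs => simp [evens]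
      · show (if c = '"' then fA rest (!true) else if true then fA rest true
          else c :: fA rest true) = _
        rw [if_neg hc, if_pos rfl, hs, ih2, h]
        exact rfl

theorem remove_quoted_alt_eq (s : String) :
    remove_quoted_alt s = String.ofList ((evens (splitQ s.toList)).flatten) := by
  rw [remove_quoted_alt]
  have hsplit : PySem.Str.split? s "\"" = some ((splitQ s.toList).map String.ofList) := by
    rw [PySem.Str.split?, PySem.Chars.split?]
    simp [splitOn_quote]
  rw [hsplit]
  simp only [Option.getD_some]
  rw [slice2, Option.getD_some, evens_map, PySem.Str.join]
  congr 1
  rw [PySem.Chars.join]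
  have : (List.map String.toList ((evens (splitQ s.toList)).map String.ofList))
      = evens (splitQ s.toList) := by
    rw [List.map_map]
    simp only [Function.comp_def, String.toList_ofList, List.map_id']
  rw [this]
  show List.intercalate [] (evens (splitQ s.toList)) = _
  rw [List.intercalate]
  exact intersperse_nil_flatten (evens (splitQ s.toList))

-- ===== VERDICT (by name: the statement is the Claim_ definition above) =====
theorem remove_quoted_spec : Claim_equal_remove_quoted := by
  intro s _
  show remove_quoted s = remove_quoted_alt s
  rw [remove_quoted_alt_eq, remove_quoted]
  have := fold_eq_fA s.toList [] false
  simp only [List.nil_append] at this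
  rw [this, (fA_eq_evens s.toList).1]
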